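-- pv_equiv track=rewrite | github.com/Aasthaengg/IBMdataset | Python_codes/p03464/s333438749.py | calc
-- ===== SOURCE A (Python) =====
-- def calc(n, N, x):
--     m, M = -1, -1
--     L, R = 0, 10**13
--     while L+1 < R:
--         P = (L+R)//2
--         if n <= x*P:
--             R = P
--         else:
--             L = P
--     if n <= x*R <= N:
--         m = x*R
--     L, R = 0, 10**13
--     while L+1 < R:
--         P = (L+R)//2
--         if N < x*P:
--             R = P
--         else:
--             L = P
--     if n <= x*L <= N:
--         M = x*L + (x-1)
--     return m, M
-- ===== SOURCE B (Python) =====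
-- def calc(n, N, x):
--     # closed-form: smallest P >= 1 with n <= x*P is ceil(n/x) (clamped to the
--     # search domain P >= 1), largest P >= 0 with x*P <= N is N//x (clamped to P >= 0)
--     P = max(1, (n + x - 1) // x)
--     m = x * P if n <= x * P <= N else -1
--     Q = max(0, N // x)
--     M = x * Q + (x - 1) if n <= x * Q <= N else -1
--     return m, M
-- ===== Notes on version B (the rewrite author's own statement) =====
-- stated objective: simpler
-- what changed: Both 43-iteration binary searches over [0,10^13] are replaced by closed-form divisions: ceiling division (n+x-1)//x for the smallest P>=1 with n<=x*P and floor division N//x for the largest P>=0 with x*P<=N, with the same guarded checks.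
-- outside the precondition, e.g. on calc(1, 10, 0): A returns (-1, -1), B raises ZeroDivisionError; on calc(-5, 10, -3): A returns (-1, -1), B returns (-1, -4)
import Mathlib
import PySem

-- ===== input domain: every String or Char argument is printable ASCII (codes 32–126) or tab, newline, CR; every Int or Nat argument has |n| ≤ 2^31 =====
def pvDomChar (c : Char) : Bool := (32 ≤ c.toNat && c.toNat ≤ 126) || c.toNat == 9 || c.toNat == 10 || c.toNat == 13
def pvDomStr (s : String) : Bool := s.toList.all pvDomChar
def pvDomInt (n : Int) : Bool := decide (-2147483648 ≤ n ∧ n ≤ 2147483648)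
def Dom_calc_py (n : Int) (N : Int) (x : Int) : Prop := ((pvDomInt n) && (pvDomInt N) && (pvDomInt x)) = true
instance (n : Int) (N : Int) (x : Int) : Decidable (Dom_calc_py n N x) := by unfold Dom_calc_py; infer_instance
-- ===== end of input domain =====

-- B replaces A's two fixed-bound binary searches by closed-form ceiling/floor divisions (simpler); return-value equivalence on the natural domain x >= 1.


-- ===== PORT A =====
-- the 'while L+1 < R: P=(L+R)//2; if p(P): R=P else: L=P' loop that A writes out twice;
-- the fuel argument is only a totality guard: R - L fuel always outlasts the loop
def pyLoop (fuel : Nat) (p : Int → Bool) (L R : Int) : Int × Int :=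
  match fuel with
  | 0 => (L, R)
  | f + 1 =>
    if L + 1 < R then
      let P := PySem.Int.floordiv (L + R) 2
      if p P then pyLoop f p L P else pyLoop f p P R
    else (L, R)

def calc_py (n : Int) (N : Int) (x : Int) : Int × Int :=
  let r1 := pyLoop 10000000000000 (fun P => decide (n ≤ x * P)) 0 10000000000000
  let m : Int := if n ≤ x * r1.2 ∧ x * r1.2 ≤ N then x * r1.2 else -1
  let r2 := pyLoop 10000000000000 (fun P => decide (N < x * P)) 0 10000000000000
  let M : Int := if n ≤ x * r2.1 ∧ x * r2.1 ≤ N then x * r2.1 + (x - 1) else -1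
  (m, M)

-- ===== PORT B =====
def calc_py_alt (n : Int) (N : Int) (x : Int) : Int × Int :=
  let P := max 1 (PySem.Int.floordiv (n + x - 1) x)
  let m : Int := if n ≤ x * P ∧ x * P ≤ N then x * P else -1
  let Q := max 0 (PySem.Int.floordiv N x)
  let M : Int := if n ≤ x * Q ∧ x * Q ≤ N then x * Q + (x - 1) else -1
  (m, M)

-- ===== PRECONDITION & SPEC =====
-- Pre_ restricts to the natural domain x >= 1 of "multiples of x": for x <= 0 the searched
-- predicate is non-monotone and A's sentinel results are artefacts of the fixed search
-- bounds, while B's closed-form division is meaningless there (division by zero at x = 0).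
def Pre_calc_py (n : Int) (N : Int) (x : Int) : Prop := 1 ≤ x
instance (n : Int) (N : Int) (x : Int) : Decidable (Pre_calc_py n N x) := by
  unfold Pre_calc_py; infer_instance
def pvWitness_calc_py : Int × Int × Int := (3, 20, 7)

def Spec_calc_py (n : Int) (N : Int) (x : Int) (out : Int × Int) : Prop := out = calc_py_alt n N x
instance (n : Int) (N : Int) (x : Int) (out : Int × Int) : Decidable (Spec_calc_py n N x out) := by
  unfold Spec_calc_py; infer_instance

-- ===== CLAIM (what is proved, stated in full; the proofs are below) =====
def Claim_equal_calc_py : Prop := ∀ (n : Int) (N : Int) (x : Int), Dom_calc_py n N x → Pre_calc_py n N x → Spec_calc_py n N x (calc_py n N x)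

-- ===== LEMMAS AND PROOFS =====

-- loop invariant: if p holds at R and fails at L (or L = 0), the loop returns an adjacent
-- pair (L', R') with the same boundary properties; no monotonicity of p is needed here.
theorem pyLoop_inv (fuel : Nat) (p : Int → Bool) (L R : Int) (h0 : 0 ≤ L) (hLR : L < R)
    (hfuel : (R - L).toNat ≤ fuel)
    (hR : p R = true) (hL : L = 0 ∨ p L = false) :
    (pyLoop fuel p L R).1 + 1 = (pyLoop fuel p L R).2 ∧ 0 ≤ (pyLoop fuel p L R).1 ∧
      p (pyLoop fuel p L R).2 = true ∧
      ((pyLoop fuel p L R).1 = 0 ∨ p (pyLoop fuel p L R).1 = false) := by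
  induction fuel generalizing L R with
  | zero => omega
  | succ f ih =>
    rw [pyLoop]
    by_cases h : L + 1 < R
    · have h2 : PySem.Int.floordiv (L + R) 2 = (L + R) / 2 :=
        PySem.Int.floordiv_eq_ediv_of_pos (by omega)
      simp only [h, if_pos]
      cases hp : p (PySem.Int.floordiv (L + R) 2) with
      | true =>
        rw [if_pos rfl]
        exact ih L _ h0 (by omega) (by omega) hp hL
      | false =>
        rw [if_neg (by simp)]
        exact ih _ R (by omega) (by omega) (by omega) hR (Or.inr hp)
    · simp only [h, if_neg, not_false_iff]
      refine ⟨by omega, h0, by simpa [show R = L + 1 by omega] using hR, hL⟩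

-- a monotone predicate pins the adjacent boundary pair uniquely
theorem bound_unique (a b : Int) (q : Int → Prop)
    (hmono : ∀ u v : Int, u ≤ v → q u → q v)
    (ha : 0 ≤ a ∧ q (a + 1) ∧ (a = 0 ∨ ¬ q a))
    (hb : 0 ≤ b ∧ q (b + 1) ∧ (b = 0 ∨ ¬ q b)) : a = b := by
  rcases ha with ⟨ha0, haq, haL⟩
  rcases hb with ⟨hb0, hbq, hbL⟩
  by_contra hne
  rcases lt_or_gt_of_ne hne with hlt | hlt
  · rcases hbL with h | h
    · omega
    · exact h (hmono (a + 1) b (by omega) haq)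
  · rcases haL with h | h
    · omega
    · exact h (hmono (b + 1) a (by omega) hbq)

theorem ediv_bounds (a x : Int) (hx : 0 < x) : x * (a / x) ≤ a ∧ a < x * (a / x) + x := by
  have h1 := Int.ediv_add_emod a x
  have h2 := Int.emod_nonneg a (by omega : x ≠ 0)
  have h3 := Int.emod_lt_of_pos a hx
  constructor <;> linarith

theorem first_loop_val (n x : Int) (hx : 1 ≤ x) (hn : n ≤ 2147483648) :
    (pyLoop 10000000000000 (fun P => decide (n ≤ x * P)) 0 10000000000000).2
      = max 1 (PySem.Int.floordiv (n + x - 1) x) := by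
  have hdiv : PySem.Int.floordiv (n + x - 1) x = (n + x - 1) / x :=
    PySem.Int.floordiv_eq_ediv_of_pos (by omega)
  have hqd := ediv_bounds (n + x - 1) x (by omega)
  set q : Int := (n + x - 1) / x with hq
  have htop : n ≤ x * 10000000000000 := by nlinarith
  obtain ⟨hadj, hL0, hpR, hbnd⟩ := pyLoop_inv 10000000000000 (fun P => decide (n ≤ x * P))
    0 10000000000000 (by omega) (by omega) (by omega) (by simpa using htop) (Or.inl rfl)
  have hkey : (pyLoop 10000000000000 (fun P => decide (n ≤ x * P)) 0 10000000000000).1 = max 1 q - 1 := by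
    apply bound_unique _ _ (fun P => n ≤ x * P)
      (fun u v huv h => by nlinarith)
    · refine ⟨hL0, ?_, ?_⟩
      · rw [hadj]; exact of_decide_eq_true hpR
      · rcases hbnd with h | h
        · exact Or.inl h
        · exact Or.inr (by simpa using h)
    · refine ⟨by omega, ?_, ?_⟩
      · by_cases h1 : q ≤ 1
        · have hb0 : max 1 q - 1 + 1 = 1 := by omega
          rw [hb0]
          have hq0 : x * q ≤ x * 1 := by nlinarith
          nlinarith [hqd.2]
        · have hb0 : max 1 q - 1 + 1 = q := by omega
          rw [hb0]
          have : n - 1 < x * q := by linarith [hqd.2]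
          omega
      · by_cases h1 : q ≤ 1
        · exact Or.inl (by omega)
        · refine Or.inr ?_
          have hb0 : max 1 q - 1 = q - 1 := by omega
          rw [hb0]
          have : x * (q - 1) < n := by nlinarith [hqd.1]
          omega
  omega

theorem second_loop_val (N x : Int) (hx : 1 ≤ x) (hN : N ≤ 2147483648) :
    (pyLoop 10000000000000 (fun P => decide (N < x * P)) 0 10000000000000).1
      = max 0 (PySem.Int.floordiv N x) := by
  have hdiv : PySem.Int.floordiv N x = N / x :=
    PySem.Int.floordiv_eq_ediv_of_pos (by omega)
  have hqd := ediv_bounds N x (by omega)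
  set d : Int := N / x with hd
  have htop : N < x * 10000000000000 := by nlinarith
  obtain ⟨hadj, hL0, hpR, hbnd⟩ := pyLoop_inv 10000000000000 (fun P => decide (N < x * P))
    0 10000000000000 (by omega) (by omega) (by omega) (by simpa using htop) (Or.inl rfl)
  have hkey : (pyLoop 10000000000000 (fun P => decide (N < x * P)) 0 10000000000000).1 = max 0 d := by
    apply bound_unique _ _ (fun P => N < x * P)
      (fun u v huv h => by nlinarith)
    · refine ⟨hL0, ?_, ?_⟩
      · rw [hadj]; exact of_decide_eq_true hpR
      · rcases hbnd with h | h
        · exact Or.inl h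
        · exact Or.inr (by simpa using h)
    · refine ⟨by omega, ?_, ?_⟩
      · by_cases h1 : d ≤ 0
        · have hb0 : max 0 d + 1 = 1 := by omega
          rw [hb0]
          have hq0 : x * d ≤ x * 0 := by nlinarith
          nlinarith [hqd.2]
        · have hb0 : max 0 d + 1 = d + 1 := by omega
          rw [hb0]
          nlinarith [hqd.2]
      · by_cases h1 : d ≤ 0
        · exact Or.inl (by omega)
        · refine Or.inr ?_
          have hb0 : max 0 d = d := by omega
          rw [hb0]
          exact not_lt.mpr hqd.1
  omega

-- ===== VERDICT (by name: the statement is the Claim_ definition above) =====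
theorem calc_py_spec : Claim_equal_calc_py := by
  intro n N x hdom hpre
  have hx : 1 ≤ x := hpre
  have hn : n ≤ 2147483648 ∧ N ≤ 2147483648 := by
    simp only [Dom_calc_py, pvDomInt, Bool.and_eq_true, decide_eq_true_eq] at hdom
    exact ⟨hdom.1.1.2, hdom.1.2.2⟩
  unfold Spec_calc_py calc_py calc_py_alt
  simp only [first_loop_val n x hx hn.1, second_loop_val N x hx hn.2]
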